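-- pv_equiv track=rewrite | github.com/clashzz/clashhogs | src/skassist/util.py | find_first_appearance
-- ===== SOURCE A (Python) =====
-- def find_first_appearance(text:str, keywords:list):
--     index=len(text)
--     found=False
--     for k in keywords:
--         if k in text:
--             found = True
--             idx = text.index(k)
--             if idx<index:
--                 index=idx
--     if found:
--         return index
--     else:
--         return -1
-- ===== SOURCE B (Python) =====
-- def find_first_appearance(text: str, keywords: list):
--     # Scan text positions left to right; return the first position where any keyword starts.
--     for i in range(len(text) + 1):
--         for k in keywords:
--             if text.startswith(k, i):
--                 return i
--     return -1
-- ===== Notes on version B (the rewrite author's own statement) =====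
-- stated objective: faster
-- what changed: B replaces A's per-keyword full substring search with running min (text.index per keyword) by a single left-to-right scan of text positions that returns as soon as any keyword starts there (early exit).
import Mathlib
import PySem

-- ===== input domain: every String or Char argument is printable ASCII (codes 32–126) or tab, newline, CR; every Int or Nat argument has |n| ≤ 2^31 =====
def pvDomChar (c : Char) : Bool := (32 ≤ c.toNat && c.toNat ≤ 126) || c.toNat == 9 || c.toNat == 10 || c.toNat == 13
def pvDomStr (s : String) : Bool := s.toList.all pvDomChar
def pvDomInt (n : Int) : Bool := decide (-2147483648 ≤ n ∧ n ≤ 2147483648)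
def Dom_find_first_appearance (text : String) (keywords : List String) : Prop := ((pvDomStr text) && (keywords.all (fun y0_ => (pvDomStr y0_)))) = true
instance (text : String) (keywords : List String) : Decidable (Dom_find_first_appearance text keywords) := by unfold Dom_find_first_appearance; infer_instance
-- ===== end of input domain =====

-- B scans text positions left to right and returns the first position where any keyword
-- starts (early exit), instead of A's per-keyword substring search with a running minimum.


-- ===== PORT A =====
-- loop body of A: 'if k in text: found=True; idx=text.index(k); if idx<index: index=idx'
-- ('k in text' = PySem.Str.isIn; 'text.index(k)' for k present = PySem.Str.find)
def ffaStep (text : String) (s : Int × Bool) (k : String) : Int × Bool :=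
  if PySem.Str.isIn k text then
    let idx := PySem.Str.find text k
    if idx < s.1 then (idx, true) else (s.1, true)
  else s

def find_first_appearance (text : String) (keywords : List String) : Int :=
  let r := keywords.foldl (ffaStep text) (PySem.Str.len text, false)
  if r.2 then r.1 else -1

-- ===== PORT B =====
-- 'for i in range(len(text)+1): for k in keywords: if text.startswith(k, i): return i'
-- ('text.startswith(k, i)' with 0 ≤ i ≤ len(text) is exactly k.toList.isPrefixOf (toList.drop i))
def ffaAltGo (t : List Char) (keywords : List String) (i : Nat) : Nat → Int
  | 0 => -1
  | rem + 1 =>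
    if keywords.any (fun k => k.toList.isPrefixOf (t.drop i)) then (i : Int)
    else ffaAltGo t keywords (i + 1) rem

def find_first_appearance_alt (text : String) (keywords : List String) : Int :=
  ffaAltGo text.toList keywords 0 (text.toList.length + 1)

-- ===== PRECONDITION & SPEC =====
def Spec_find_first_appearance (text : String) (keywords : List String) (out : Int) : Prop := out = find_first_appearance_alt text keywords
instance (text : String) (keywords : List String) (out : Int) : Decidable (Spec_find_first_appearance text keywords out) := by unfold Spec_find_first_appearance; infer_instance

-- ===== CLAIM (what is proved, stated in full; the proofs are below) =====
def Claim_equal_find_first_appearance : Prop := ∀ (text : String) (keywords : List String), Dom_find_first_appearance text keywords → Spec_find_first_appearance text keywords (find_first_appearance text keywords)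

-- ===== LEMMAS AND PROOFS =====

-- Characterisation of PySem.Chars.find.go: either no match anywhere, or the first match.
theorem ffa_go_spec (sub : List Char) (s : List Char) (k : Nat) :
    (PySem.Chars.find.go sub s k = -1 ∧ ∀ j : Nat, sub.isPrefixOf (s.drop j) = false) ∨
    (∃ jf : Nat, PySem.Chars.find.go sub s k = ((k + jf : Nat) : Int) ∧ jf ≤ s.length ∧
      sub.isPrefixOf (s.drop jf) = true ∧ ∀ j : Nat, j < jf → sub.isPrefixOf (s.drop j) = false) := by
  induction s generalizing k with
  | nil =>
    by_cases he : sub.isEmpty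
    · right
      refine ⟨0, ?_, by simp, ?_, by omega⟩
      · simp [PySem.Chars.find.go, he]
      · simp at he; simp [he]
    · left
      constructor
      · simp [PySem.Chars.find.go, he]
      · intro j
        cases sub with
        | nil => simp at he
        | cons a l => simp
  | cons h t ih =>
    by_cases hp : sub.isPrefixOf (h :: t)
    · right
      exact ⟨0, by simp [PySem.Chars.find.go, hp], by simp, by simpa using hp, by omega⟩
    · have hgo : PySem.Chars.find.go sub (h :: t) k = PySem.Chars.find.go sub t (k + 1) := by
        simp [PySem.Chars.find.go, hp]
      have hdrop : ∀ j : Nat, (h :: t).drop (j + 1) = t.drop j := by intro j; rfl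
      rcases ih (k + 1) with ⟨hne, hall⟩ | ⟨jf, heq, hle, hpre, hmin⟩
      · left
        refine ⟨by rw [hgo]; exact hne, ?_⟩
        intro j
        cases j with
        | zero => simp only [List.drop_zero]; exact Bool.eq_false_iff.mpr (by simpa using hp)
        | succ j => rw [hdrop]; exact hall j
      · right
        refine ⟨jf + 1, ?_, by simpa using Nat.succ_le_succ hle, by rw [hdrop]; exact hpre, ?_⟩
        · rw [hgo, heq]; congr 1; omega
        · intro j hj
          cases j with
          | zero => simp only [List.drop_zero]; exact Bool.eq_false_iff.mpr (by simpa using hp)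
          | succ j => rw [hdrop]; exact hmin j (by omega)

theorem ffa_find_spec (s sub : List Char) :
    (PySem.Chars.find s sub = -1 ∧ ∀ j : Nat, sub.isPrefixOf (s.drop j) = false) ∨
    (∃ jf : Nat, PySem.Chars.find s sub = (jf : Int) ∧ jf ≤ s.length ∧
      sub.isPrefixOf (s.drop jf) = true ∧ ∀ j : Nat, j < jf → sub.isPrefixOf (s.drop j) = false) := by
  have h := ffa_go_spec sub s 0
  simpa [PySem.Chars.find] using h

-- A's fold: found = any membership; index = running minimum of the first-occurrence indices.
theorem ffa_foldA_spec (text : String) (ks : List String) (cur : Int) (b : Bool) :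
    let r := ks.foldl (ffaStep text) (cur, b)
    r.2 = (b || ks.any (fun k => PySem.Str.isIn k text)) ∧
    r.1 ≤ cur ∧
    (∀ k ∈ ks, PySem.Str.isIn k text = true → r.1 ≤ PySem.Str.find text k) ∧
    (r.1 = cur ∨ ∃ k ∈ ks, PySem.Str.isIn k text = true ∧ r.1 = PySem.Str.find text k) := by
  induction ks generalizing cur b with
  | nil => simp
  | cons k ks ih =>
    intro r
    have hany : (k :: ks).any (fun k => PySem.Str.isIn k text)
        = (PySem.Str.isIn k text || ks.any (fun k => PySem.Str.isIn k text)) := by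
      simp
    by_cases hk : PySem.Str.isIn k text = true
    · by_cases hlt : PySem.Str.find text k < cur
      · have hr : r = ks.foldl (ffaStep text) (PySem.Str.find text k, true) := by
          show List.foldl _ (ffaStep text (cur, b) k) _ = _
          rw [ffaStep, if_pos hk, if_pos hlt]
        obtain ⟨h2, hle, hall, hlast⟩ := ih (PySem.Str.find text k) true
        rw [hr]
        refine ⟨by rw [h2, hany, hk]; simp, by omega, ?_, ?_⟩
        · intro k' hk' hin
          rcases List.mem_cons.mp hk' with rfl | hk'
          · exact hle
          · exact hall k' hk' hin
        · rcases hlast with h | ⟨k', hk', hin, heq⟩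
          · exact Or.inr ⟨k, List.mem_cons_self, hk, h⟩
          · exact Or.inr ⟨k', List.mem_cons_of_mem _ hk', hin, heq⟩
      · have hr : r = ks.foldl (ffaStep text) (cur, true) := by
          show List.foldl _ (ffaStep text (cur, b) k) _ = _
          rw [ffaStep, if_pos hk, if_neg hlt]
        obtain ⟨h2, hle, hall, hlast⟩ := ih cur true
        rw [hr]
        refine ⟨by rw [h2, hany, hk]; simp, hle, ?_, ?_⟩
        · intro k' hk' hin
          rcases List.mem_cons.mp hk' with rfl | hk'
          · omega
          · exact hall k' hk' hin
        · rcases hlast with h | ⟨k', hk', hin, heq⟩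
          · exact Or.inl h
          · exact Or.inr ⟨k', List.mem_cons_of_mem _ hk', hin, heq⟩
    · have hr : r = ks.foldl (ffaStep text) (cur, b) := by
        show List.foldl _ (ffaStep text (cur, b) k) _ = _
        rw [ffaStep, if_neg hk]
      obtain ⟨h2, hle, hall, hlast⟩ := ih cur b
      rw [hr]
      have hkf : PySem.Str.isIn k text = false := by
        exact Bool.not_eq_true _ ▸ (by simpa using hk)
      refine ⟨by rw [h2, hany, hkf]; simp, hle, ?_, ?_⟩
      · intro k' hk' hin
        rcases List.mem_cons.mp hk' with rfl | hk'
        · exact absurd hin hk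
        · exact hall k' hk' hin
      · rcases hlast with h | ⟨k', hk', hin, heq⟩
        · exact Or.inl h
        · exact Or.inr ⟨k', List.mem_cons_of_mem _ hk', hin, heq⟩

-- B's loop: -1 and no match in the scanned window, or the first matching position.
theorem ffa_altGo_spec (t : List Char) (ks : List String) (rem : Nat) (i : Nat) :
    (ffaAltGo t ks i rem = -1 ∧
      ∀ j : Nat, i ≤ j → j < i + rem → (ks.any (fun k => k.toList.isPrefixOf (t.drop j))) = false) ∨
    (∃ jm : Nat, ffaAltGo t ks i rem = (jm : Int) ∧ i ≤ jm ∧ jm < i + rem ∧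
      (ks.any (fun k => k.toList.isPrefixOf (t.drop jm))) = true ∧
      ∀ j : Nat, i ≤ j → j < jm → (ks.any (fun k => k.toList.isPrefixOf (t.drop j))) = false) := by
  induction rem generalizing i with
  | zero => exact Or.inl ⟨rfl, fun j h1 h2 => by omega⟩
  | succ rem ih =>
    by_cases hp : (ks.any (fun k => k.toList.isPrefixOf (t.drop i))) = true
    · exact Or.inr ⟨i, by rw [ffaAltGo, if_pos hp], le_refl _, by omega, hp, fun j h1 h2 => by omega⟩
    · have hpf : (ks.any (fun k => k.toList.isPrefixOf (t.drop i))) = false := by simpa using hp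
      have hgo : ffaAltGo t ks i (rem + 1) = ffaAltGo t ks (i + 1) rem := by
        rw [ffaAltGo, if_neg hp]
      rcases ih (i + 1) with ⟨hne, hall⟩ | ⟨jm, heq, h1, h2, h3, hmin⟩
      · refine Or.inl ⟨hgo ▸ hne, fun j hj1 hj2 => ?_⟩
        rcases Nat.eq_or_lt_of_le hj1 with rfl | hj
        · exact hpf
        · exact hall j hj (by omega)
      · refine Or.inr ⟨jm, hgo ▸ heq, by omega, by omega, h3, fun j hj1 hj2 => ?_⟩
        rcases Nat.eq_or_lt_of_le hj1 with rfl | hj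
        · exact hpf
        · exact hmin j hj hj2

-- membership of k in text ↔ some position where k is a prefix of the rest
theorem ffa_isIn_true (text k : String)
    (j : Nat) (hj : k.toList.isPrefixOf (text.toList.drop j) = true) :
    PySem.Str.isIn k text = true := by
  show PySem.Chars.isIn k.toList text.toList = true
  rw [PySem.Chars.isIn]
  rcases ffa_find_spec text.toList k.toList with ⟨_, hall⟩ | ⟨jf, heq, _, _, _⟩
  · rw [hall j] at hj; exact absurd hj (by simp)
  · simp [heq]

-- ===== VERDICT (by name: the statement is the Claim_ definition above) =====
theorem find_first_appearance_spec : Claim_equal_find_first_appearance := by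
  intro text ks _
  show find_first_appearance text ks = find_first_appearance_alt text ks
  set t := text.toList with ht
  set n := t.length with hn
  obtain ⟨h2, hle, hall, hlast⟩ := ffa_foldA_spec text ks (PySem.Str.len text) false
  set r := ks.foldl (ffaStep text) (PySem.Str.len text, false) with hr
  have hlen : PySem.Str.len text = (n : Int) := PySem.Str.len_eq text
  rcases ffa_altGo_spec t ks (n + 1) 0 with ⟨hB, hnomatch⟩ | ⟨jm, hB, _, hjm, hQ, hmin⟩
  · -- no keyword matches anywhere: A's found stays false
    have hfound : r.2 = false := by
      rw [h2, Bool.false_or]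
      by_contra hx
      have hx' : ks.any (fun k => PySem.Str.isIn k text) = true := by simpa using hx
      obtain ⟨k, hk, hin⟩ := List.any_eq_true.mp hx'
      have hin' : PySem.Chars.isIn k.toList t = true := hin
      rw [PySem.Chars.isIn] at hin'
      rcases ffa_find_spec t k.toList with ⟨heq, _⟩ | ⟨jf, heq, hjf, hpre, _⟩
      · rw [heq] at hin'; simp at hin'
      · have : (ks.any (fun k => k.toList.isPrefixOf (t.drop jf))) = false :=
          hnomatch jf (by omega) (by omega)
        have := List.any_eq_false.mp this k hk
        exact this (by simpa using hpre)
    show (if r.2 then r.1 else -1) = ffaAltGo t ks 0 (n + 1)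
    rw [hfound, hB]; simp
  · -- first matching position jm: A's minimum equals jm
    obtain ⟨k0, hk0, hpre0⟩ := List.any_eq_true.mp hQ
    have hin0 : PySem.Str.isIn k0 text = true := ffa_isIn_true text k0 jm (by simpa using hpre0)
    have hfound : r.2 = true := by
      rw [h2, Bool.false_or]
      exact List.any_eq_true.mpr ⟨k0, hk0, by simpa using hin0⟩
    -- r.1 ≤ jm : find of k0 is at most jm
    have hub : r.1 ≤ (jm : Int) := by
      rcases ffa_find_spec t k0.toList with ⟨_, hallf⟩ | ⟨jf, heq, _, _, hminf⟩
      · rw [hallf jm] at hpre0; exact absurd hpre0 (by simp)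
      · have hjle : jf ≤ jm := by
          by_contra hx
          rw [hminf jm (by omega)] at hpre0
          exact absurd hpre0 (by simp)
        have := hall k0 hk0 hin0
        have hfk : PySem.Str.find text k0 = (jf : Int) := heq
        rw [hfk] at this
        omega
    -- jm ≤ r.1 : every candidate value of r.1 is ≥ jm
    have hlb : (jm : Int) ≤ r.1 := by
      rcases hlast with hcur | ⟨k1, hk1, hin1, heq1⟩
      · rw [hcur, hlen]; omega
      · have hin1' : PySem.Chars.isIn k1.toList t = true := hin1
        rw [PySem.Chars.isIn] at hin1'
        rcases ffa_find_spec t k1.toList with ⟨heqf, _⟩ | ⟨jf, heqf, _, hpref, _⟩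
        · rw [heqf] at hin1'; simp at hin1'
        · have hfk : PySem.Str.find text k1 = (jf : Int) := heqf
          have hjmle : jm ≤ jf := by
            by_contra hx
            have hfalse := hmin jf (by omega) (by omega)
            have := List.any_eq_false.mp hfalse k1 hk1
            exact this (by simpa using hpref)
          rw [heq1, hfk]; omega
    have hr1 : r.1 = (jm : Int) := le_antisymm hub hlb
    show (if r.2 then r.1 else -1) = ffaAltGo t ks 0 (n + 1)
    rw [hfound, hB, if_pos rfl, hr1]
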